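-- pv_equiv track=rewrite | github.com/COLAB2/midca | midca/domains/grace/interface/gridworld.py | abstractPosToRange
-- ===== SOURCE A (Python) =====
-- def abstractPosToRange(s):
--     start_x = -141
--     start_y = 76 - 80*5
--     side = 80
--     tags = []
--     grid_n = 5
--     grid_m = 5
--     for i in range(grid_n):
--         for j in range(grid_m):
--             tags.append([start_x + j*80, start_y + i*80])
--
--     return tags[s][0], tags[s][1], 20
-- ===== SOURCE B (Python) =====
-- def abstractPosToRange(s):
--     # Closed form: no 25-entry table; row/col from the linear index directly.
--     # range(25)[s] keeps list-style index semantics (negative indices and the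
--     # same out-of-range exception) that indexing the table gave.
--     i, j = divmod(range(25)[s], 5)
--     return -141 + j * 80, -324 + i * 80, 20
-- ===== Notes on version B (the rewrite author's own statement) =====
-- stated objective: simpler
-- what changed: Replaces building a 25-entry coordinate table with nested loops and then indexing it by a direct closed-form computation: the linear index comes from indexing range(25) (which keeps list-style index semantics, including negative indices), and divmod(idx, 5) yields the row and column.
import Mathlib
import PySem

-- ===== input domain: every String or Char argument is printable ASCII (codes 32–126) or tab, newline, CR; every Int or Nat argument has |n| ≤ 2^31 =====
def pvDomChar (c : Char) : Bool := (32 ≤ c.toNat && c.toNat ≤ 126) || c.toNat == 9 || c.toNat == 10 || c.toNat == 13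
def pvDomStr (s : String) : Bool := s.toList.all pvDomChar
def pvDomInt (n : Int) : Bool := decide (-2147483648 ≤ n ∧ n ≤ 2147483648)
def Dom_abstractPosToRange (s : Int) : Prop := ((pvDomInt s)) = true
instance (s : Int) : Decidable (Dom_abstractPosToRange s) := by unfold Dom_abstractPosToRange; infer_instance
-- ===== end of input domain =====

-- B: closed-form row/column computation (divmod of the linear index) instead of
-- building a 25-entry coordinate table with nested loops and indexing it.


-- ===== PORT A =====
def abstractPosToRange (s : Int) : Int × Int × Int :=
  let start_x : Int := -141
  let start_y : Int := 76 - 80 * 5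
  let tags : List (List Int) :=
    (PySem.List.pyRange 0 5 1).foldl (fun acc i =>
      (PySem.List.pyRange 0 5 1).foldl (fun acc2 j =>
        acc2 ++ [[start_x + j * 80, start_y + i * 80]]) acc) []
  -- tags[s] raises IndexError outside Pre_; the out-of-Pre_ fallback value is unclaimed
  match PySem.List.pyGet? tags s with
  | some row => ((PySem.List.pyGet? row 0).getD 0, (PySem.List.pyGet? row 1).getD 0, 20)
  | none => (0, 0, 20)

-- ===== PORT B =====
def abstractPosToRange_alt (s : Int) : Int × Int × Int :=
  -- range(25)[s]; raises IndexError outside Pre_, fallback value unclaimed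
  match PySem.List.pyGet? (PySem.List.pyRange 0 25 1) s with
  | some idx =>
    let i := PySem.Int.floordiv idx 5
    let j := PySem.Int.mod idx 5
    (-141 + j * 80, -324 + i * 80, 20)
  | none => (0, 0, 20)

-- ===== PRECONDITION & SPEC =====
-- Pre_: exactly the s for which A's tags[s] does not raise IndexError (len(tags) = 25).
def Pre_abstractPosToRange (s : Int) : Prop := -25 ≤ s ∧ s < 25
instance (s : Int) : Decidable (Pre_abstractPosToRange s) := by unfold Pre_abstractPosToRange; infer_instance
def pvWitness_abstractPosToRange : Int := (7)

def Spec_abstractPosToRange (s : Int) (out : Int × Int × Int) : Prop := out = abstractPosToRange_alt s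
instance (s : Int) (out : Int × Int × Int) : Decidable (Spec_abstractPosToRange s out) := by unfold Spec_abstractPosToRange; infer_instance

-- ===== CLAIM (what is proved, stated in full; the proofs are below) =====
def Claim_equal_abstractPosToRange : Prop := ∀ (s : Int), Dom_abstractPosToRange s → Pre_abstractPosToRange s → Spec_abstractPosToRange s (abstractPosToRange s)

-- ===== LEMMAS AND PROOFS =====
-- Helper literal forms of the two ports (used only by the proofs below).
def pvTagsLit : List (List Int) :=
  [[-141, -324], [-61, -324], [19, -324], [99, -324], [179, -324],
   [-141, -244], [-61, -244], [19, -244], [99, -244], [179, -244],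
   [-141, -164], [-61, -164], [19, -164], [99, -164], [179, -164],
   [-141, -84], [-61, -84], [19, -84], [99, -84], [179, -84],
   [-141, -4], [-61, -4], [19, -4], [99, -4], [179, -4]]

def pvLitA (s : Int) : Int × Int × Int :=
  match PySem.List.pyGet? pvTagsLit s with
  | some row => ((PySem.List.pyGet? row 0).getD 0, (PySem.List.pyGet? row 1).getD 0, 20)
  | none => (0, 0, 20)

def pvLitB (s : Int) : Int × Int × Int :=
  match PySem.List.pyGet? [(0:Int), 1, 2, 3, 4, 5, 6, 7, 8, 9, 10, 11, 12,
      13, 14, 15, 16, 17, 18, 19, 20, 21, 22, 23, 24] s with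
  | some idx => (-141 + PySem.Int.mod idx 5 * 80, -324 + PySem.Int.floordiv idx 5 * 80, 20)
  | none => (0, 0, 20)

-- A's nested foldl builds exactly the literal table (one evaluation).
theorem pvTagsEval :
    (PySem.List.pyRange 0 5 1).foldl (fun acc i =>
      (PySem.List.pyRange 0 5 1).foldl (fun acc2 j =>
        acc2 ++ [[(-141 : Int) + j * 80, (76 - 80 * 5 : Int) + i * 80]]) acc) ([] : List (List Int)) =
    pvTagsLit := by decide

theorem pvRangeEval :
    PySem.List.pyRange 0 25 1 =
    [(0:Int), 1, 2, 3, 4, 5, 6, 7, 8, 9, 10, 11, 12, 13, 14, 15, 16, 17, 18, 19, 20, 21, 22, 23, 24] := by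
  decide

theorem pvEvalA (s : Int) : abstractPosToRange s = pvLitA s := by
  unfold abstractPosToRange pvLitA
  simp only [pvTagsEval]

theorem pvEvalB (s : Int) : abstractPosToRange_alt s = pvLitB s := by
  unfold abstractPosToRange_alt pvLitB
  simp only [pvRangeEval]

-- Every legal index is n or n - 25 for some n < 25; check all 50 cases on the literal forms.
theorem pvCases_abstractPosToRange : ∀ n : Fin 25,
    pvLitA (n : Int) = pvLitB (n : Int) ∧
    pvLitA ((n : Int) - 25) = pvLitB ((n : Int) - 25) := by
  decide

-- ===== VERDICT (by name: the statement is the Claim_ definition above) =====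
theorem abstractPosToRange_spec : Claim_equal_abstractPosToRange := by
  intro s _ hpre
  obtain ⟨h1, h2⟩ := hpre
  unfold Spec_abstractPosToRange
  rw [pvEvalA, pvEvalB]
  rcases (show 0 ≤ s ∨ s < 0 by omega) with hs | hs
  · have hn : s.toNat < 25 := by omega
    have h := (pvCases_abstractPosToRange ⟨s.toNat, hn⟩).1
    simpa [Int.toNat_of_nonneg hs] using h
  · have hn : (s + 25).toNat < 25 := by omega
    have h := (pvCases_abstractPosToRange ⟨(s + 25).toNat, hn⟩).2
    have he : (((s + 25).toNat : Int)) - 25 = s := by omega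
    rwa [he] at h
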